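-- pv_equiv track=rewrite | github.com/tomasvanagas/prime-research | experiments/wildcard/automata_prime_count.py | build_product_dfa_transitions
-- ===== SOURCE A (Python) =====
-- def primes_up_to(B):
--     """Simple sieve of Eratosthenes."""
--     if B < 2:
--         return []
--     sieve = [True] * (B + 1)
--     sieve[0] = sieve[1] = False
--     for i in range(2, int(B**0.5) + 1):
--         if sieve[i]:
--             for j in range(i*i, B + 1, i):
--                 sieve[j] = False
--     return [i for i in range(2, B + 1) if sieve[i]]
--
-- def build_product_dfa_transitions(B):
--     """
--     Build the product DFA for "n not divisible by any prime <= B".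
--
--     States: tuples (r2, r3, r5, ..., rp) where ri = n mod pi.
--     We represent states as integers in [0, M) where M = prod(primes <= B).
--
--     For each bit b in {0, 1}, the transition is:
--         state -> (2 * state + b) mod M
--
--     But we work with the product representation for efficiency.
--
--     Accept states: those where ALL residues are nonzero.
--
--     Returns: M (number of states), accept_set, transition matrices as sparse dicts.
--     """
--     primes = primes_up_to(B)
--     M = 1
--     for p in primes:
--         M *= p
--
--     # Accept states: state s is accepted if s % p != 0 for all primes p <= B
--     # State s represents the tuple (s % p1, s % p2, ..., s % pk) via CRT
--     accept_set = set()
--     for s in range(M):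
--         accepted = True
--         for p in primes:
--             if s % p == 0:
--                 accepted = False
--                 break
--         if accepted:
--             accept_set.add(s)
--
--     return M, primes, accept_set
-- ===== SOURCE B (Python) =====
-- def primes_up_to(B):
--     """Simple sieve of Eratosthenes."""
--     if B < 2:
--         return []
--     sieve = [True] * (B + 1)
--     sieve[0] = sieve[1] = False
--     for i in range(2, int(B**0.5) + 1):
--         if sieve[i]:
--             for j in range(i*i, B + 1, i):
--                 sieve[j] = False
--     return [i for i in range(2, B + 1) if sieve[i]]
--
-- def build_product_dfa_transitions(B):
--     primes = primes_up_to(B)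
--     M = 1
--     for p in primes:
--         M *= p
--     # Sieve the state space: mark every multiple of each prime once,
--     # instead of trial-dividing every state by every prime.
--     ok = [True] * M
--     for p in primes:
--         ok[::p] = [False] * len(range(0, M, p))
--     accept_set = {s for s in range(M) if ok[s]}
--     return M, primes, accept_set
-- ===== Notes on version B (the rewrite author's own statement) =====
-- stated objective: faster
-- what changed: Replaces A's per-state trial division by every prime with a sieve: each prime marks its multiples of the state space once via slice assignment, then survivors are collected in one pass; intended as faster, measured 1.98x at the largest size both programs finished.
import Mathlib
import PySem

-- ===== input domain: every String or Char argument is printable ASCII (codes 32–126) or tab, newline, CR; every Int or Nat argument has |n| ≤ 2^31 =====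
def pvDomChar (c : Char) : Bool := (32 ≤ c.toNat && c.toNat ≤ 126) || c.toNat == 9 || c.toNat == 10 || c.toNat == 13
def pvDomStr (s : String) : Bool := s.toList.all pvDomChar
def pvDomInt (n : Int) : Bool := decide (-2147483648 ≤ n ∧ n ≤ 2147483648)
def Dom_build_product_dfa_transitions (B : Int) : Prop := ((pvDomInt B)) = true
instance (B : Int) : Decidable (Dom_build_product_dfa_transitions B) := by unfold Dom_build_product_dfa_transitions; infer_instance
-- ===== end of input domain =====

-- B replaces A's per-state trial division by all primes with a sieve that marks each
-- prime's multiples of the state space once, then collects survivors in one pass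
-- (intended as faster; measured 1.98x at the largest size both programs finished).


-- ===== PORT A =====
-- Shared helper primes_up_to (identical source lines in Source A and Source B).
-- int(B**0.5) is ported as Nat.sqrt: exact for 0 ≤ B ≤ 2^31 (double sqrt is correctly
-- rounded and cannot cross an integer at this magnitude); the branch only runs for B ≥ 2.
def primes_up_to (B : Int) : List Int :=
  if B < 2 then []
  else
    let sieve0 := (List.replicate (B + 1).toNat true).set 0 false |>.set 1 false
    let sieve :=
      (PySem.List.pyRange 2 ((Nat.sqrt B.toNat : Int) + 1) 1).foldl
        (fun sv i =>
          if PySem.List.pyGetD sv i false then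
            (PySem.List.pyRange (i * i) (B + 1) i).foldl (fun sv j => sv.set j.toNat false) sv
          else sv)
        sieve0
    (PySem.List.pyRange 2 (B + 1) 1).filter (fun i => PySem.List.pyGetD sieve i false)

-- the inner 'for p in primes: if s % p == 0: accepted = False; break' loop of A
def pvAccepted (s : Int) : List Int → Bool
  | [] => true
  | p :: ps => if PySem.Int.mod s p == 0 then false else pvAccepted s ps

def build_product_dfa_transitions (B : Int) : Int × List Int × List Int :=
  let primes := primes_up_to B
  let M := primes.foldl (fun m p => m * p) 1
  let accept_set :=
    (PySem.List.pyRange 0 M 1).foldl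
      (fun acc s => if pvAccepted s primes then PySem.Set.add acc s else acc)
      PySem.Set.empty
  (M, primes, accept_set)

-- ===== PORT B =====
-- ok[::p] = [False]*len(range(0,M,p)) sets exactly the indices of range(0,M,p) to False:
-- ported as a fold over that range (exact: slice assignment touches those positions).
def build_product_dfa_transitions_alt (B : Int) : Int × List Int × List Int :=
  let primes := primes_up_to B
  let M := primes.foldl (fun m p => m * p) 1
  let ok :=
    primes.foldl
      (fun ok p => (PySem.List.pyRange 0 M p).foldl (fun l j => l.set j.toNat false) ok)
      (List.replicate M.toNat true)
  let accept_set :=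
    PySem.Set.ofList
      ((PySem.List.pyRange 0 M 1).filter (fun s => PySem.List.pyGetD ok s false))
  (M, primes, accept_set)

-- ===== PRECONDITION & SPEC =====
def Spec_build_product_dfa_transitions (B : Int) (out : Int × List Int × List Int) : Prop := out = build_product_dfa_transitions_alt B
instance (B : Int) (out : Int × List Int × List Int) : Decidable (Spec_build_product_dfa_transitions B out) := by unfold Spec_build_product_dfa_transitions; infer_instance

-- ===== CLAIM (what is proved, stated in full; the proofs are below) =====
def Claim_equal_build_product_dfa_transitions : Prop := ∀ (B : Int), Dom_build_product_dfa_transitions B → Spec_build_product_dfa_transitions B (build_product_dfa_transitions B)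

-- ===== LEMMAS AND PROOFS =====

lemma mem_primes_pos {B p : Int} (h : p ∈ primes_up_to B) : 0 < p := by
  unfold primes_up_to at h
  split at h
  · simp at h
  · have := List.mem_of_mem_filter h
    have := PySem.List.mem_pyRange_one.mp this
    omega

lemma pvAccepted_eq (s : Int) (l : List Int) :
    pvAccepted s l = !(l.any (fun p => decide (p ∣ s))) := by
  induction l with
  | nil => rfl
  | cons p ps ih =>
      simp only [pvAccepted, List.any_cons, ih]
      by_cases h : p ∣ s
      · have : PySem.Int.mod s p = 0 := (PySem.Int.mod_eq_zero_iff_dvd s p).mpr h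
        simp [this, h]
      · have : PySem.Int.mod s p ≠ 0 := fun hc => h ((PySem.Int.mod_eq_zero_iff_dvd s p).mp hc)
        simp [this, h]

-- marking a list of nonnegative indices to false, observed through getElem?
lemma foldl_set_getElem? (js : List Int) (hjs : ∀ j ∈ js, 0 ≤ j) (l : List Bool) (s : Nat) :
    (js.foldl (fun l j => l.set j.toNat false) l)[s]? =
      if (s : Int) ∈ js then (l[s]?).map (fun _ => false) else l[s]? := by
  induction js generalizing l with
  | nil => simp
  | cons j rest ih =>
      have hj : 0 ≤ j := hjs j (by simp)
      have hrest : ∀ x ∈ rest, 0 ≤ x := fun x hx => hjs x (by simp [hx])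
      simp only [List.foldl_cons]
      rw [ih hrest]
      by_cases hmem : (s : Int) ∈ rest
      · simp only [hmem, if_pos, List.mem_cons, or_true]
        rw [List.getElem?_set]
        by_cases hje : j.toNat = s
        · simp only [hje]
          by_cases hlt : s < l.length
          · simp [hlt]
          · simp [hlt]
        · simp [hje]
      · rw [List.getElem?_set]
        by_cases hje : j.toNat = s
        · have hsj : (s : Int) = j := by omega
          simp only [List.mem_cons, hsj, true_or, if_true, hje]
          by_cases hlt : s < l.length
          · simp [hlt]
          · simp [hlt]
        · have hsj : ¬ ((s : Int) = j) := by omega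
          simp [List.mem_cons, hsj, hmem, hje]

-- the whole sieve loop of B, observed through getElem?
lemma sieve_getElem? (primes : List Int) (M : Int) (hp : ∀ p ∈ primes, 0 < p)
    (l : List Bool) (s : Nat) :
    (primes.foldl
        (fun ok p => (PySem.List.pyRange 0 M p).foldl (fun l j => l.set j.toNat false) ok)
        l)[s]? =
      if (∃ p ∈ primes, (s : Int) ∈ PySem.List.pyRange 0 M p) then
        (l[s]?).map (fun _ => false)
      else l[s]? := by
  induction primes generalizing l with
  | nil => simp
  | cons p ps ih =>
      have hp0 : 0 < p := hp p (by simp)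
      have hps : ∀ q ∈ ps, 0 < q := fun q hq => hp q (by simp [hq])
      have hnn : ∀ j ∈ PySem.List.pyRange 0 M p, 0 ≤ j := by
        intro j hj
        exact ((PySem.List.mem_pyRange_iff_of_pos hp0 j).mp hj).1
      simp only [List.foldl_cons, ih hps]
      rw [foldl_set_getElem? _ hnn]
      by_cases h1 : (s : Int) ∈ PySem.List.pyRange 0 M p
      · by_cases h2 : ∃ q ∈ ps, (s : Int) ∈ PySem.List.pyRange 0 M q
        · simp only [h1, if_pos, h2]
          have : ∃ q, (q = p ∨ q ∈ ps) ∧ (s : Int) ∈ PySem.List.pyRange 0 M q :=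
            ⟨p, Or.inl rfl, h1⟩
          simp only [List.mem_cons, this, if_true, Option.map_map]
          rfl
        · have : ∃ q, (q = p ∨ q ∈ ps) ∧ (s : Int) ∈ PySem.List.pyRange 0 M q :=
            ⟨p, Or.inl rfl, h1⟩
          simp [h1, h2, List.mem_cons, this]
      · by_cases h2 : ∃ q ∈ ps, (s : Int) ∈ PySem.List.pyRange 0 M q
        · have : ∃ q, (q = p ∨ q ∈ ps) ∧ (s : Int) ∈ PySem.List.pyRange 0 M q := by
            obtain ⟨q, hq, hm⟩ := h2; exact ⟨q, Or.inr hq, hm⟩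
          simp [h1, h2, List.mem_cons, this]
        · have : ¬ ∃ q, (q = p ∨ q ∈ ps) ∧ (s : Int) ∈ PySem.List.pyRange 0 M q := by
            rintro ⟨q, hq | hq, hm⟩
            · exact h1 (hq ▸ hm)
            · exact h2 ⟨q, hq, hm⟩
          simp [h1, h2, List.mem_cons, this]

-- ===== VERDICT (by name: the statement is the Claim_ definition above) =====
theorem build_product_dfa_transitions_spec : Claim_equal_build_product_dfa_transitions := by
  intro B _
  unfold Spec_build_product_dfa_transitions
  unfold build_product_dfa_transitions build_product_dfa_transitions_alt
  simp only []
  set primes := primes_up_to B with hprimes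
  set M := primes.foldl (fun m p => m * p) 1 with hM
  refine Prod.ext rfl (Prod.ext rfl ?_)
  -- reduce both accumulation loops to filters of range(M)
  have hA :
      (PySem.List.pyRange 0 M 1).foldl
          (fun acc s => if pvAccepted s primes then PySem.Set.add acc s else acc)
          PySem.Set.empty
        = (PySem.List.pyRange 0 M 1).filter (fun s => pvAccepted s primes) := by
    rw [PySem.List.foldl_if_eq_foldl_filter (fun s => pvAccepted s primes) PySem.Set.add]
    rw [show (PySem.Set.empty : PySem.Set Int) = ([] : List Int) from rfl,
        ← PySem.Set.ofList_eq_foldl]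
    exact PySem.Set.ofList_eq_self_of_nodup _
      ((PySem.List.nodup_pyRange_one 0 M).filter _)
  have hB :
      PySem.Set.ofList ((PySem.List.pyRange 0 M 1).filter
          (fun s => PySem.List.pyGetD
            (primes.foldl
              (fun ok p => (PySem.List.pyRange 0 M p).foldl (fun l j => l.set j.toNat false) ok)
              (List.replicate M.toNat true)) s false))
        = (PySem.List.pyRange 0 M 1).filter
            (fun s => PySem.List.pyGetD
              (primes.foldl
                (fun ok p => (PySem.List.pyRange 0 M p).foldl (fun l j => l.set j.toNat false) ok)
                (List.replicate M.toNat true)) s false) :=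
    PySem.Set.ofList_eq_self_of_nodup _ ((PySem.List.nodup_pyRange_one 0 M).filter _)
  rw [hA, hB]
  apply List.filter_congr
  intro s hs
  have hsr := PySem.List.mem_pyRange_one.mp hs
  have hp : ∀ p ∈ primes, 0 < p := fun p hp => mem_primes_pos hp
  have hsn : s.toNat < M.toNat := by omega
  have hcast : ((s.toNat : Int)) = s := by omega
  -- evaluate B's lookup
  rw [PySem.List.pyGetD_of_nonneg _ _ hsr.1]
  have hget := sieve_getElem? primes M hp (List.replicate M.toNat true) s.toNat
  have hrep : (List.replicate M.toNat true)[s.toNat]? = some true := by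
    simp [hsn]
  rw [List.getD_eq_getElem?_getD, hget, hrep]
  rw [pvAccepted_eq]
  by_cases hdvd : ∃ p ∈ primes, p ∣ s
  · have : ∃ p ∈ primes, ((s.toNat : Int)) ∈ PySem.List.pyRange 0 M p := by
      obtain ⟨p, hpm, hd⟩ := hdvd
      exact ⟨p, hpm, (PySem.List.mem_pyRange_iff_of_pos (hp p hpm) _).mpr
        (by rw [hcast]; exact ⟨hsr.1, hsr.2, by simpa using hd⟩)⟩
    simp only [this, if_true, Option.map_some]
    have : primes.any (fun p => decide (p ∣ s)) = true := by
      simp only [List.any_eq_true, decide_eq_true_eq]; exact hdvd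
    simp [this]
  · have : ¬ ∃ p ∈ primes, ((s.toNat : Int)) ∈ PySem.List.pyRange 0 M p := by
      rintro ⟨p, hpm, hm⟩
      have := (PySem.List.mem_pyRange_iff_of_pos (hp p hpm) _).mp hm
      exact hdvd ⟨p, hpm, by rw [hcast] at this; simpa using this.2.2⟩
    simp only [this, if_false]
    have : primes.any (fun p => decide (p ∣ s)) = false := by
      simp only [List.any_eq_false, decide_eq_true_eq]
      intro p hpm hd; exact hdvd ⟨p, hpm, hd⟩
    simp [this]
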